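-- pv_equiv track=rewrite | github.com/adam-p4/programming-practice | maze1_2.py | matrixify
-- ===== SOURCE A (Python) =====
-- def matrixify(maze):
--     ls = []
--     full_ls = []
--     for i in maze:
--         if i =='\n':
--             full_ls.append(ls)
--             ls = []
--         else:
--             ls.append(i)
--     full_ls.append(ls)
--     return full_ls
-- ===== SOURCE B (Python) =====
-- def matrixify(maze):
--     return [list(line) for line in maze.split('\n')]
-- ===== Notes on version B (the rewrite author's own statement) =====
-- stated objective: idiomatic
-- what changed: Replaces the manual character-by-character scan with flush-on-newline accumulators by a single str.split on the newline separator followed by list() on each line; split's guarantee of a final (possibly empty) segment reproduces the unconditional last append.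
import Mathlib
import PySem

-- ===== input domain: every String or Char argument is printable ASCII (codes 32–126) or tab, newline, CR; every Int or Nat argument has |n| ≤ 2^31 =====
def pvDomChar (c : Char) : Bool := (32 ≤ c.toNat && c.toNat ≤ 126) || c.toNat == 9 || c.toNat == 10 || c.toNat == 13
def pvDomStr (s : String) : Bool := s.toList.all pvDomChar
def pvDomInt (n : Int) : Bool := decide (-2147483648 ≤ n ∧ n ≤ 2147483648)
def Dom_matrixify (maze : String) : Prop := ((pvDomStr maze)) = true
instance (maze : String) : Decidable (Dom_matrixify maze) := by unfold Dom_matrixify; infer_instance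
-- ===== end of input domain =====

-- B replaces A's character-by-character scan (flush accumulator on newline) by split('\n') + per-line list(); idiomatic, same cost.


-- ===== PORT A =====
-- A: scan the characters; on '\n' flush the current line into full_ls, else append the char (as a 1-char string); final unconditional flush.
def matrixify (maze : String) : List (List String) :=
  let st := maze.toList.foldl
    (fun (st : List String × List (List String)) i =>
      if i = '\n' then ([], st.2 ++ [st.1])
      else (st.1 ++ [String.mk [i]], st.2))
    ([], [])
  st.2 ++ [st.1]

-- ===== PORT B =====
-- B: split on '\n', then turn each line into its list of 1-char strings.
def matrixify_alt (maze : String) : List (List String) :=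
  (PySem.Chars.splitOn maze.toList ['\n']).map (fun line => line.map (fun c => String.mk [c]))

-- ===== PRECONDITION & SPEC =====
def Spec_matrixify (maze : String) (out : List (List String)) : Prop := out = matrixify_alt maze
instance (maze : String) (out : List (List String)) : Decidable (Spec_matrixify maze out) := by unfold Spec_matrixify; infer_instance

-- ===== CLAIM (what is proved, stated in full; the proofs are below) =====
def Claim_equal_matrixify : Prop := ∀ (maze : String), Dom_matrixify maze → Spec_matrixify maze (matrixify maze)

-- ===== LEMMAS AND PROOFS =====

-- Reference line decomposition of a char list at '\n' (proof-only).
def pvLines : List Char → List (List Char)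
  | [] => [[]]
  | c :: r => if c = '\n' then [] :: pvLines r
              else match pvLines r with
                   | h :: t => (c :: h) :: t
                   | [] => [[c]]

theorem pvLines_ne_nil (l : List Char) : pvLines l ≠ [] := by
  cases l with
  | nil => simp [pvLines]
  | cons c r =>
    simp only [pvLines]
    split_ifs
    · simp
    · cases h : pvLines r <;> simp

-- prepend a partial line onto the head segment
def pvConsHeadC (cur : List Char) : List (List Char) → List (List Char)
  | [] => [cur]
  | h :: t => (cur ++ h) :: t

theorem pvGo_spec (fuel : Nat) (l cur : List Char) (acc : List (List Char))
    (hf : l.length < fuel) :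
    PySem.Chars.splitOn.go ['\n'] fuel l cur acc =
      acc.reverse ++ pvConsHeadC cur.reverse (pvLines l) := by
  induction fuel generalizing l cur acc with
  | zero => omega
  | succ n ih =>
    cases l with
    | nil => simp [PySem.Chars.splitOn.go, pvLines, pvConsHeadC]
    | cons c rest =>
      simp only [PySem.Chars.splitOn.go, List.isPrefixOf]
      by_cases hc : c = '\n'
      · subst hc
        rw [if_pos (by simp)]
        rw [show List.drop (['\n'].length) ('\n' :: rest) = rest from rfl]
        rw [ih _ _ _ (by simpa using Nat.lt_of_succ_lt_succ hf)]
        cases h : pvLines rest with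
        | nil => exact absurd h (pvLines_ne_nil rest)
        | cons a t => simp [pvLines, pvConsHeadC, h]
      · rw [if_neg (by simp [Ne.symm hc])]
        rw [ih _ _ _ (by simpa using Nat.lt_of_succ_lt_succ hf)]
        cases h : pvLines rest with
        | nil => exact absurd h (pvLines_ne_nil rest)
        | cons a t => simp [pvLines, pvConsHeadC, h, hc]

theorem pvSplitOn_eq_pvLines (l : List Char) :
    PySem.Chars.splitOn l ['\n'] = pvLines l := by
  rw [PySem.Chars.splitOn, pvGo_spec _ _ _ _ (by omega)]
  cases h : pvLines l with
  | nil => exact absurd h (pvLines_ne_nil l)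
  | cons a t => simp [pvConsHeadC]

def pvChrMap (line : List Char) : List String := line.map (fun c => String.mk [c])

def pvConsHead (ls : List String) : List (List String) → List (List String)
  | [] => [ls]
  | h :: t => (ls ++ h) :: t

theorem pvFold_spec (l : List Char) (ls : List String) (full : List (List String)) :
    (let st := l.foldl
        (fun (st : List String × List (List String)) i =>
          if i = '\n' then ([], st.2 ++ [st.1])
          else (st.1 ++ [String.mk [i]], st.2)) (ls, full);
      st.2 ++ [st.1]) =
      full ++ pvConsHead ls ((pvLines l).map pvChrMap) := by
  induction l generalizing ls full with
  | nil => simp [pvLines, pvConsHead, pvChrMap]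
  | cons c rest ih =>
    simp only [List.foldl_cons]
    by_cases hc : c = '\n'
    · subst hc
      rw [if_pos rfl]
      rw [ih [] (full ++ [ls])]
      cases h : pvLines rest with
      | nil => exact absurd h (pvLines_ne_nil rest)
      | cons a t => simp [pvLines, pvConsHead, pvChrMap, h]
    · rw [if_neg hc]
      rw [ih (ls ++ [String.mk [c]]) full]
      cases h : pvLines rest with
      | nil => exact absurd h (pvLines_ne_nil rest)
      | cons a t => simp [pvLines, pvConsHead, pvChrMap, h, hc]

-- ===== VERDICT (by name: the statement is the Claim_ definition above) =====
theorem matrixify_spec : Claim_equal_matrixify := by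
  intro maze _
  show _ = _
  unfold matrixify matrixify_alt
  rw [pvSplitOn_eq_pvLines, pvFold_spec maze.toList [] []]
  cases h : pvLines maze.toList with
  | nil => exact absurd h (pvLines_ne_nil _)
  | cons a t => simp [pvConsHead, pvChrMap]
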